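-- pv_equiv track=rewrite | github.com/Howmany-Zeta/AI-Execute-Services | app/services/multi_task/workflows/dsl/dsl_parser.py | _validate_string_literals
-- ===== SOURCE A (Python) =====
-- def _validate_string_literals(condition: str) -> bool:
--     """Validate string literals more carefully."""
--     # Check for malformed strings like unclosed'string' or 'unclosed string
--
--     # Look for patterns where alphanumeric characters are directly adjacent to quotes
--     # BUT exclude cases where the quote is part of a proper string literal
--
--     # First, find all properly quoted strings
--     proper_strings = []
--     i = 0
--     while i < len(condition):
--         if condition[i] in ['"', "'"]:
--             quote_char = condition[i]
--             start = i
--             i += 1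
--             # Find the closing quote
--             while i < len(condition) and condition[i] != quote_char:
--                 i += 1
--             if i < len(condition):  # Found closing quote
--                 proper_strings.append((start, i))
--                 i += 1
--             else:
--                 # Unclosed string
--                 return False
--         else:
--             i += 1
--
--     # Now check for invalid patterns outside of proper strings
--     for i in range(len(condition)):
--         # Skip characters that are inside proper strings
--         inside_string = any(start <= i <= end for start, end in proper_strings)
--         if inside_string:
--             continue
--
--         char = condition[i]
--
--         # Check for alphanumeric followed by quote (invalid pattern like word'string')
--         if char.isalnum() and i + 1 < len(condition) and condition[i + 1] in ['"', "'"]: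
--             return False
--
--         # Check for quote followed by alphanumeric (invalid pattern like 'string'word)
--         if char in ['"', "'"] and i + 1 < len(condition) and condition[i + 1].isalnum():
--             return False
--
--     return True
-- ===== SOURCE B (Python) =====
-- def _validate_string_literals(condition: str) -> bool:
--     """Validate string literals (single pass): reject an unclosed quote and an
--     alphanumeric character immediately before an opening quote."""
--     in_quote = None  # the quote char of the string we are inside, or None
--     prev = None      # previous character
--     for c in condition:
--         if in_quote is not None:
--             if c == in_quote:
--                 in_quote = None
--         elif c in ('"', "'"):
--             if prev is not None and prev.isalnum():
--                 return False
--             in_quote = c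
--         prev = c
--     return in_quote is None
-- ===== Notes on version B (the rewrite author's own statement) =====
-- stated objective: faster
-- what changed: Replaces A's two-phase scheme (collect all quoted spans, then for every index scan the whole span list for membership) with a single left-to-right pass keeping an in-quote state and the previous character.
import Mathlib
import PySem

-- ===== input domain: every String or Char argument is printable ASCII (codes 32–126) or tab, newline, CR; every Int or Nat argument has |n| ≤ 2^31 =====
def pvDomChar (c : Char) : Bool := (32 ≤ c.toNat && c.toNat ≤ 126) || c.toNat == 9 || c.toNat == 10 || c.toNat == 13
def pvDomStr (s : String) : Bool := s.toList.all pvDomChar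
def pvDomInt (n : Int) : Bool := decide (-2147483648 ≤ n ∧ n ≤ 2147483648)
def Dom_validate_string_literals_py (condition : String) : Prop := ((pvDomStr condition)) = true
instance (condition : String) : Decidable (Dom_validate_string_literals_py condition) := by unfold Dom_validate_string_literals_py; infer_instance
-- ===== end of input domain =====

-- B replaces A's two-phase quadratic scheme (collect quoted spans, then per-index span-list scan) by one linear pass; same return value.

-- ===== PORT A =====
-- `c in ['"', "'"]`
def isQuoteC (c : Char) : Bool := c = '"' || c = '\''

-- inner `while i < len(condition) and condition[i] != quote_char: i += 1`; returns the final i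
def fcA (cs : List Char) (q : Char) (i : Nat) : Nat :=
  if h : i < cs.length then
    if cs.getD i ' ' = q then i else fcA cs q (i + 1)
  else i
termination_by cs.length - i
decreasing_by omega

-- needed for scanA's termination (cited by name below)
theorem fcA_ge (cs : List Char) (q : Char) (i : Nat) : i ≤ fcA cs q i := by
  induction hn : cs.length - i using Nat.strong_induction_on generalizing i with
  | _ n ih =>
    rw [fcA.eq_def]
    split_ifs with h1 h2
    · exact le_rfl
    · have := ih (cs.length - (i + 1)) (by omega) (i + 1) rfl
      omega
    · exact le_rfl

-- outer `while i < len(condition): …` building proper_strings; none = the `return False` on an unclosed string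
def scanA (cs : List Char) (i : Nat) (acc : List (Nat × Nat)) : Option (List (Nat × Nat)) :=
  if h : i < cs.length then
    if isQuoteC (cs.getD i ' ') then
      if hj : fcA cs (cs.getD i ' ') (i + 1) < cs.length then
        scanA cs (fcA cs (cs.getD i ' ') (i + 1) + 1) (acc ++ [(i, fcA cs (cs.getD i ' ') (i + 1))])
      else none
    else scanA cs (i + 1) acc
  else some acc
termination_by cs.length - i
decreasing_by
  · have := fcA_ge cs (cs.getD i ' ') (i + 1); omega
  · omega

-- `any(start <= i <= end for start, end in proper_strings)`
def insideAt (spans : List (Nat × Nat)) (i : Nat) : Bool :=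
  spans.any (fun p => decide (p.1 ≤ i) && decide (i ≤ p.2))

-- `for i in range(len(condition)): …`
def checkA (cs : List Char) (spans : List (Nat × Nat)) (i : Nat) : Bool :=
  if h : i < cs.length then
    if insideAt spans i then checkA cs spans (i + 1)
    else
      if (cs.getD i ' ').isAlphanum && decide (i + 1 < cs.length) && isQuoteC (cs.getD (i + 1) ' ') then false
      else if isQuoteC (cs.getD i ' ') && decide (i + 1 < cs.length) && (cs.getD (i + 1) ' ').isAlphanum then false
      else checkA cs spans (i + 1)
  else true
termination_by cs.length - i
decreasing_by all_goals omega

def validate_string_literals_py (condition : String) : Bool :=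
  match scanA condition.toList 0 [] with
  | none => false
  | some spans => checkA condition.toList spans 0

-- ===== PORT B =====
-- `prev is not None and prev.isalnum()`
def prevAlnumB : Option Char → Bool
  | none => false
  | some p => p.isAlphanum

-- the single `for c in condition` loop of B, carrying (prev, in_quote)
def bRun : List Char → Option Char → Option Char → Bool
  | [], _, inq => inq.isNone
  | c :: rest, prev, inq =>
    match inq with
    | some q => if c = q then bRun rest (some c) none else bRun rest (some c) (some q)
    | none =>
      if isQuoteC c then
        if prevAlnumB prev then false else bRun rest (some c) (some c)
      else bRun rest (some c) none

def validate_string_literals_py_alt (condition : String) : Bool :=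
  bRun condition.toList none none

-- ===== PRECONDITION & SPEC =====
def Spec_validate_string_literals_py (condition : String) (out : Bool) : Prop := out = validate_string_literals_py_alt condition
instance (condition : String) (out : Bool) : Decidable (Spec_validate_string_literals_py condition out) := by unfold Spec_validate_string_literals_py; infer_instance

-- ===== CLAIM (what is proved, stated in full; the proofs are below) =====
def Claim_equal_validate_string_literals_py : Prop := ∀ (condition : String), Dom_validate_string_literals_py condition → Spec_validate_string_literals_py condition (validate_string_literals_py condition)

-- ===== LEMMAS AND PROOFS =====

theorem quote_not_alnum {c : Char} (h : isQuoteC c = true) : c.isAlphanum = false := by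
  simp only [isQuoteC, Bool.or_eq_true, decide_eq_true_eq] at h
  rcases h with h | h <;> subst h <;> decide

theorem drop_getD (cs : List Char) (i : Nat) (h : i < cs.length) :
    cs.drop i = cs.getD i ' ' :: cs.drop (i + 1) := by
  rw [List.drop_eq_getElem_cons h, List.getD_eq_getElem cs ' ' h]

theorem fcA_prop (cs : List Char) (q : Char) (i : Nat) (hi : i ≤ cs.length) :
    fcA cs q i ≤ cs.length ∧
    (∀ k, i ≤ k → k < fcA cs q i → cs.getD k ' ' ≠ q) ∧
    (fcA cs q i < cs.length → cs.getD (fcA cs q i) ' ' = q) := by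
  induction hn : cs.length - i using Nat.strong_induction_on generalizing i with
  | _ n ih =>
    rw [fcA.eq_def]
    split_ifs with h1 h2
    · exact ⟨le_of_lt h1, fun k hk1 hk2 => by omega, fun _ => h2⟩
    · obtain ⟨a, b, c⟩ := ih (cs.length - (i + 1)) (by omega) (i + 1) (by omega) rfl
      refine ⟨a, fun k hk1 hk2 => ?_, c⟩
      rcases Nat.eq_or_lt_of_le hk1 with h | h
      · subst h; exact h2
      · exact b k h hk2
    · exact ⟨by omega, fun k hk1 hk2 => by omega, fun h => by omega⟩

-- the structure of the spans produced by scanA from index i onward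
inductive Spans (cs : List Char) : Nat → List (Nat × Nat) → Prop
  | nil (i : Nat) (h : ∀ j, i ≤ j → j < cs.length → isQuoteC (cs.getD j ' ') = false) :
      Spans cs i []
  | cons (i s e : Nat) (rest : List (Nat × Nat))
      (his : i ≤ s) (hslen : s < cs.length)
      (hnq : ∀ j, i ≤ j → j < s → isQuoteC (cs.getD j ' ') = false)
      (hqs : isQuoteC (cs.getD s ' ') = true)
      (hse : s < e) (helen : e < cs.length)
      (heq : cs.getD e ' ' = cs.getD s ' ')
      (hmid : ∀ j, s < j → j < e → cs.getD j ' ' ≠ cs.getD s ' ')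
      (hrest : Spans cs (e + 1) rest) : Spans cs i ((s, e) :: rest)

theorem spans_lb {cs : List Char} {i : Nat} {l : List (Nat × Nat)} (h : Spans cs i l) :
    ∀ p ∈ l, i ≤ p.1 ∧ p.1 < p.2 ∧ p.2 < cs.length := by
  induction h with
  | nil => intro p hp; cases hp
  | cons i s e rest his hslen hnq hqs hse helen heq hmid hrest ih =>
    intro p hp
    rcases List.mem_cons.mp hp with hp | hp
    · subst hp; exact ⟨his, hse, helen⟩
    · obtain ⟨a, b, c⟩ := ih p hp
      exact ⟨by omega, b, c⟩

theorem spans_inv_nil {cs : List Char} {i : Nat} (h : Spans cs i []) :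
    ∀ j, i ≤ j → j < cs.length → isQuoteC (cs.getD j ' ') = false := by
  cases h with
  | nil _ hnq => exact hnq

theorem spans_inv_cons {cs : List Char} {i s e : Nat} {rest : List (Nat × Nat)}
    (h : Spans cs i ((s, e) :: rest)) :
    i ≤ s ∧ s < cs.length ∧ (∀ j, i ≤ j → j < s → isQuoteC (cs.getD j ' ') = false) ∧
    isQuoteC (cs.getD s ' ') = true ∧ s < e ∧ e < cs.length ∧
    cs.getD e ' ' = cs.getD s ' ' ∧
    (∀ j, s < j → j < e → cs.getD j ' ' ≠ cs.getD s ' ') ∧ Spans cs (e + 1) rest := by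
  cases h with
  | cons _ _ _ _ his hslen hnq hqs hse helen heq hmid hrest =>
    exact ⟨his, hslen, hnq, hqs, hse, helen, heq, hmid, hrest⟩

theorem spans_weaken' {cs : List Char} {i : Nat} {l : List (Nat × Nat)}
    (h : Spans cs (i + 1) l) (hq : isQuoteC (cs.getD i ' ') = false) : Spans cs i l := by
  match l with
  | [] =>
    have hnq := spans_inv_nil h
    refine Spans.nil i (fun j hj hjl => ?_)
    rcases Nat.eq_or_lt_of_le hj with h' | h'
    · subst h'; exact hq
    · exact hnq j h' hjl
  | (s, e) :: rest =>
    obtain ⟨his, hslen, hnq, hqs, hse, helen, heq, hmid, hrest⟩ := spans_inv_cons h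
    refine Spans.cons i s e rest (by omega) hslen (fun j hj hjl => ?_) hqs hse helen heq hmid hrest
    rcases Nat.eq_or_lt_of_le hj with h' | h'
    · subst h'; exact hq
    · exact hnq j h' hjl

theorem scan_some (cs : List Char) :
    ∀ (i : Nat) (acc spans : List (Nat × Nat)), i ≤ cs.length →
      scanA cs i acc = some spans → ∃ l, spans = acc ++ l ∧ Spans cs i l := by
  intro i
  induction hn : cs.length - i using Nat.strong_induction_on generalizing i with
  | _ n ih =>
    intro acc spans hi hscan
    rw [scanA.eq_def] at hscan
    by_cases h1 : i < cs.length
    · rw [dif_pos h1] at hscan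
      by_cases h2 : isQuoteC (cs.getD i ' ') = true
      · rw [if_pos h2] at hscan
        by_cases h3 : fcA cs (cs.getD i ' ') (i + 1) < cs.length
        · rw [dif_pos h3] at hscan
          obtain ⟨l', hl'1, hl'2⟩ := ih (cs.length - (fcA cs (cs.getD i ' ') (i + 1) + 1))
            (by have := fcA_ge cs (cs.getD i ' ') (i + 1); omega)
            (fcA cs (cs.getD i ' ') (i + 1) + 1) rfl _ spans (by omega) hscan
          obtain ⟨hfc1, hfc2, hfc3⟩ := fcA_prop cs (cs.getD i ' ') (i + 1) (by omega)
          refine ⟨(i, fcA cs (cs.getD i ' ') (i + 1)) :: l', by simpa using hl'1, ?_⟩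
          exact Spans.cons i i _ l' le_rfl h1 (fun j hj hjl => by omega) h2
            (by have := fcA_ge cs (cs.getD i ' ') (i + 1); omega) h3 (hfc3 h3)
            (fun j hj hjl => hfc2 j (by omega) hjl) hl'2
        · rw [dif_neg h3] at hscan
          exact absurd hscan (by simp)
      · rw [if_neg h2] at hscan
        obtain ⟨l, hl1, hl2⟩ := ih (cs.length - (i + 1)) (by omega) (i + 1) rfl acc spans
          (by omega) hscan
        exact ⟨l, hl1, spans_weaken' hl2 (by simpa using h2)⟩
    · rw [dif_neg h1] at hscan
      have hh : acc = spans := Option.some.inj hscan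
      refine ⟨[], by rw [List.append_nil]; exact hh.symm, Spans.nil i (fun j hj hjl => by omega)⟩

-- B inside a properly closed string: runs to just past the closing quote
theorem b_inside (cs : List Char) (q : Char) (e : Nat) (helen : e < cs.length)
    (heq : cs.getD e ' ' = q) :
    ∀ (k : Nat) (prev : Option Char), k ≤ e →
      (∀ m, k ≤ m → m < e → cs.getD m ' ' ≠ q) →
      bRun (cs.drop k) prev (some q) = bRun (cs.drop (e + 1)) (some q) none := by
  intro k
  induction hn : e - k using Nat.strong_induction_on generalizing k with
  | _ n ih =>
    intro prev hk hmid
    have hkl : k < cs.length := by omega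
    rw [drop_getD cs k hkl]
    rcases Nat.eq_or_lt_of_le hk with h | h
    · subst h
      simp only [bRun]
      rw [if_pos heq, heq]
    · have hne : cs.getD k ' ' ≠ q := hmid k le_rfl h
      simp only [bRun]
      rw [if_neg hne]
      exact ih (e - (k + 1)) (by omega) (k + 1) rfl _ (by omega)
        (fun m hm1 hm2 => hmid m (by omega) hm2)

-- B inside an unclosed string: returns false
theorem b_noclose (cs : List Char) (q : Char) :
    ∀ (k : Nat) (prev : Option Char), k ≤ cs.length →
      (∀ m, k ≤ m → m < cs.length → cs.getD m ' ' ≠ q) →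
      bRun (cs.drop k) prev (some q) = false := by
  intro k
  induction hn : cs.length - k using Nat.strong_induction_on generalizing k with
  | _ n ih =>
    intro prev hk hno
    rcases Nat.eq_or_lt_of_le hk with h | h
    · rw [h, List.drop_length]; rfl
    · rw [drop_getD cs k h]
      simp only [bRun, if_neg (hno k le_rfl h)]
      exact ih (cs.length - (k + 1)) (by omega) (k + 1) rfl _ (by omega)
        (fun m hm1 hm2 => hno m (by omega) hm2)

-- if A's scan hits an unclosed string (returns False), B also returns false from that point
theorem scan_none_b (cs : List Char) :
    ∀ (i : Nat) (acc : List (Nat × Nat)) (prev : Option Char), i ≤ cs.length →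
      scanA cs i acc = none → bRun (cs.drop i) prev none = false := by
  intro i
  induction hn : cs.length - i using Nat.strong_induction_on generalizing i with
  | _ n ih =>
    intro acc prev hi hscan
    rw [scanA.eq_def] at hscan
    by_cases h1 : i < cs.length
    · rw [dif_pos h1] at hscan
      by_cases h2 : isQuoteC (cs.getD i ' ') = true
      · rw [if_pos h2] at hscan
        obtain ⟨hfc1, hfc2, hfc3⟩ := fcA_prop cs (cs.getD i ' ') (i + 1) (by omega)
        rw [drop_getD cs i h1]
        simp only [bRun]
        rw [if_pos h2]
        split_ifs with hpa
        · rfl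
        · by_cases h3 : fcA cs (cs.getD i ' ') (i + 1) < cs.length
          · rw [dif_pos h3] at hscan
            have hij : i + 1 ≤ fcA cs (cs.getD i ' ') (i + 1) := fcA_ge cs (cs.getD i ' ') (i + 1)
            rw [b_inside cs (cs.getD i ' ') (fcA cs (cs.getD i ' ') (i + 1)) h3 (hfc3 h3)
              (i + 1) _ hij (fun m hm1 hm2 => hfc2 m hm1 hm2)]
            exact ih (cs.length - (fcA cs (cs.getD i ' ') (i + 1) + 1)) (by omega)
              (fcA cs (cs.getD i ' ') (i + 1) + 1) rfl _ _ (by omega) hscan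
          · exact b_noclose cs (cs.getD i ' ') (i + 1) _ (by omega)
              (fun m hm1 hm2 => hfc2 m hm1 (by omega))
      · rw [if_neg h2] at hscan
        rw [drop_getD cs i h1]
        simp only [bRun]
        rw [if_neg h2]
        exact ih (cs.length - (i + 1)) (by omega) (i + 1) rfl acc _ (by omega) hscan
    · rw [dif_neg h1] at hscan
      exact absurd hscan (by simp)

theorem insideAt_false_of_lt {l : List (Nat × Nat)} {k : Nat}
    (h : ∀ p ∈ l, k < p.1) : insideAt l k = false := by
  simp only [insideAt, List.any_eq_false, Bool.and_eq_true, decide_eq_true_eq, not_and]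
  intro p hp h1
  have := h p hp; omega

theorem checkA_skip (cs : List Char) (L : List (Nat × Nat)) (s e : Nat)
    (hin : ∀ j, s ≤ j → j ≤ e → insideAt L j = true) (helen : e < cs.length) :
    ∀ k, s ≤ k → k ≤ e → checkA cs L k = checkA cs L (e + 1) := by
  intro k
  induction hn : e + 1 - k using Nat.strong_induction_on generalizing k with
  | _ n ih =>
    intro hk1 hk2
    rw [checkA.eq_def]
    rw [dif_pos (by omega), if_pos (hin k hk1 hk2)]
    rcases Nat.eq_or_lt_of_le hk2 with h | h
    · rw [h]
    · exact ih (e + 1 - (k + 1)) (by omega) (k + 1) rfl (by omega) (by omega)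

-- main simulation: A's check loop from index i equals B's run from index i
theorem mainA (cs : List Char) (L : List (Nat × Nat)) :
    ∀ (n i : Nat) (l : List (Nat × Nat)) (prev : Option Char), cs.length - i = n →
      i ≤ cs.length → Spans cs i l →
      (∀ j, i ≤ j → insideAt L j = insideAt l j) →
      prevAlnumB prev = (decide (0 < i) && (cs.getD (i - 1) ' ').isAlphanum) →
      (i < cs.length → isQuoteC (cs.getD i ' ') = true → prevAlnumB prev = false) →
      checkA cs L i = bRun (cs.drop i) prev none := by
  intro n
  induction n using Nat.strong_induction_on with
  | _ n ih =>
    intro i l prev hn hi hsp hins hprev hH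
    by_cases hil : i < cs.length
    · have hdrop := drop_getD cs i hil
      rcases hl : l with _ | ⟨⟨s, e⟩, rest⟩
      · subst hl
        have hnq := spans_inv_nil hsp
        have hq : isQuoteC (cs.getD i ' ') = false := hnq i le_rfl hil
        have hin0 : insideAt L i = false := by rw [hins i le_rfl]; rfl
        have hcond1 : ((cs.getD i ' ').isAlphanum && decide (i + 1 < cs.length) &&
            isQuoteC (cs.getD (i + 1) ' ')) = false := by
          by_cases h : i + 1 < cs.length
          · rw [hnq (i + 1) (by omega) h]; simp
          · simp [h]
        rw [checkA.eq_def, dif_pos hil, hin0]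
        simp only [Bool.false_eq_true, if_false, hcond1, hq, Bool.false_and]
        rw [hdrop]
        simp only [bRun]
        rw [if_neg (by rw [hq]; simp)]
        refine ih (cs.length - (i + 1)) (by omega) (i + 1) [] (some (cs.getD i ' ')) rfl
          (by omega) (Spans.nil (i + 1) (fun j hj hjl => hnq j (by omega) hjl))
          (fun j hj => hins j (by omega)) (by simp [prevAlnumB]) ?_
        intro h1 h2
        rw [hnq (i + 1) (by omega) h1] at h2
        exact absurd h2 (by simp)
      · subst hl
        obtain ⟨his, hslen, hnq, hqs, hse, helen, heq, hmid, hrest⟩ := spans_inv_cons hsp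
        by_cases hiseq : i = s
        · subst hiseq
          have hinT : ∀ j, i ≤ j → j ≤ e → insideAt L j = true := by
            intro j h1 h2
            rw [hins j h1]
            simp [insideAt, h1, h2]
          rw [checkA_skip cs L i e hinT helen i le_rfl (le_of_lt hse)]
          rw [hdrop]
          simp only [bRun]
          rw [if_pos hqs, if_neg (by rw [hH hil hqs]; simp)]
          rw [b_inside cs (cs.getD i ' ') e helen heq (i + 1) (some (cs.getD i ' '))
            (by omega) (fun m h1 h2 => hmid m (by omega) h2)]
          refine ih (cs.length - (e + 1)) (by omega) (e + 1) rest (some (cs.getD i ' ')) rfl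
            (by omega) hrest ?_ ?_ ?_
          · intro j hj
            rw [hins j (by omega)]
            have hje : ¬ (j ≤ e) := by omega
            simp [insideAt, hje]
          · simp only [prevAlnumB, Nat.add_sub_cancel, heq, quote_not_alnum hqs]
            simp
          · intro _ _
            simp only [prevAlnumB]
            exact quote_not_alnum hqs
        · have hislt : i < s := by omega
          have hq : isQuoteC (cs.getD i ' ') = false := hnq i le_rfl hislt
          have hin0 : insideAt L i = false := by
            rw [hins i le_rfl]
            refine insideAt_false_of_lt (fun p hp => ?_)
            rcases List.mem_cons.mp hp with hp | hp
            · subst hp; exact hislt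
            · have := (spans_lb hrest p hp).1; omega
          rw [checkA.eq_def, dif_pos hil, hin0]
          simp only [Bool.false_eq_true, if_false]
          by_cases hs1 : i + 1 = s
          · by_cases hal : (cs.getD i ' ').isAlphanum
            · have hcond1 : ((cs.getD i ' ').isAlphanum && decide (i + 1 < cs.length) &&
                  isQuoteC (cs.getD (i + 1) ' ')) = true := by
                rw [hs1, hqs]
                rw [show (cs.getD i ' ').isAlphanum = true from hal]
                simp [hslen]
              rw [if_pos hcond1]
              rw [hdrop]
              simp only [bRun]
              rw [if_neg (by rw [hq]; simp)]
              rw [drop_getD cs (i + 1) (by omega), hs1]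
              simp only [bRun]
              rw [if_pos hqs, if_pos (by simp only [prevAlnumB]; exact hal)]
            · have hal' : (cs.getD i ' ').isAlphanum = false := by simpa using hal
              rw [if_neg (by rw [hal']; simp), if_neg (by rw [hq]; simp)]
              rw [hdrop]
              simp only [bRun]
              rw [if_neg (by rw [hq]; simp)]
              refine ih (cs.length - (i + 1)) (by omega) (i + 1) ((s, e) :: rest)
                (some (cs.getD i ' ')) rfl (by omega)
                (Spans.cons (i + 1) s e rest (by omega) hslen
                  (fun j h1 h2 => hnq j (by omega) h2) hqs hse helen heq hmid hrest)
                (fun j hj => hins j (by omega)) (by simp [prevAlnumB]) ?_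
              intro _ _
              simpa [prevAlnumB] using hal'
          · have hq1 : isQuoteC (cs.getD (i + 1) ' ') = false :=
              hnq (i + 1) (by omega) (by omega)
            rw [if_neg (by rw [hq1]; simp), if_neg (by rw [hq]; simp)]
            rw [hdrop]
            simp only [bRun]
            rw [if_neg (by rw [hq]; simp)]
            refine ih (cs.length - (i + 1)) (by omega) (i + 1) ((s, e) :: rest)
              (some (cs.getD i ' ')) rfl (by omega)
              (Spans.cons (i + 1) s e rest (by omega) hslen
                (fun j h1 h2 => hnq j (by omega) h2) hqs hse helen heq hmid hrest)
              (fun j hj => hins j (by omega)) (by simp [prevAlnumB]) ?_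
            intro h1 h2
            rw [hq1] at h2
            exact absurd h2 (by simp)
    · have hieq : i = cs.length := by omega
      rw [checkA.eq_def, dif_neg hil, hieq, List.drop_length]
      rfl

-- ===== VERDICT (by name: the statement is the Claim_ definition above) =====
theorem validate_string_literals_py_spec : Claim_equal_validate_string_literals_py := by
  intro condition _
  unfold Spec_validate_string_literals_py validate_string_literals_py validate_string_literals_py_alt
  cases hscan : scanA condition.toList 0 [] with
  | none =>
    have := scan_none_b condition.toList 0 [] none (by omega) hscan
    rw [List.drop_zero] at this
    exact this.symm
  | some spans =>
    obtain ⟨l, hl1, hl2⟩ := scan_some condition.toList 0 [] spans (by omega) hscan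
    simp only [List.nil_append] at hl1
    subst hl1
    have := mainA condition.toList spans (condition.toList.length - 0) 0 spans none rfl
      (by omega) hl2 (fun j _ => rfl) (by simp [prevAlnumB]) (fun _ _ => rfl)
    rw [List.drop_zero] at this
    exact this
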